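-- pv_equiv track=rewrite | github.com/egetaktak1212/ArtCapstone | keypoints/draw_box_pycharm.py | get_connected_points
-- ===== SOURCE A (Python) =====
-- connections = [
--     [[1, 2], [2, 3]],
--     [[4, 5], [5, 6]],
--     [[7, 8], [8, 9]],
--     [[10, 11], [11, 12]],
--     [[14, 15], [15, 16], [14, 16], [22, 14], [22, 16]],
--     [[18, 19], [19, 20]]
-- ]
--
-- def get_connected_points(start_points):
--     connected = set(start_points)
--     changed = True
--
--     while changed:
--         changed = False
--         for feature in connections:
--             for p1, p2 in feature:
--                 if p1 in connected or p2 in connected: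
--                     if p1 not in connected or p2 not in connected:
--                         connected.add(p1)
--                         connected.add(p2)
--                         changed = True
--     return connected
-- ===== SOURCE B (Python) =====
-- # The fixed `connections` graph decomposes into six connected components (one per
-- # feature); the closure of a start set is therefore: the start points, plus every
-- # component that contains a start point.  One pass over the six precomputed
-- # components replaces A's repeated edge-list relaxation to a fixpoint.
-- components = [
--     {1, 2, 3},
--     {4, 5, 6},
--     {7, 8, 9},
--     {10, 11, 12},
--     {14, 15, 16, 22},
--     {18, 19, 20},
-- ]
--
-- def get_connected_points(start_points):
--     seeds = set(start_points)
--     result = set(seeds)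
--     for comp in components:
--         if not comp.isdisjoint(seeds):
--             result |= comp
--     return result
-- ===== Notes on version B (the rewrite author's own statement) =====
-- stated objective: simpler
-- what changed: Replaces the whole-edge-list fixpoint relaxation with a single pass over the six precomputed connected components of the fixed graph: a component is merged into the result iff it contains a start point.
import Mathlib
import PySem

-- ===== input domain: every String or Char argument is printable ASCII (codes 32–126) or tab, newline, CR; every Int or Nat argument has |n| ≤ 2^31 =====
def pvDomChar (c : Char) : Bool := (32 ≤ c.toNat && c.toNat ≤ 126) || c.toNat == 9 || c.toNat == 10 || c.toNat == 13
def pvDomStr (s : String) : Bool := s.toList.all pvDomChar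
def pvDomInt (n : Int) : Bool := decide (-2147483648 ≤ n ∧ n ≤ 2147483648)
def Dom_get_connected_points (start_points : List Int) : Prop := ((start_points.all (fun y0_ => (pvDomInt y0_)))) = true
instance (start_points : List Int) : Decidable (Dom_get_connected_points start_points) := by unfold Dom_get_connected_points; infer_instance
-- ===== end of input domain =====

-- B replaces A's repeated edge-list relaxation by one pass over the precomputed connected
-- components of the fixed graph (objective: simpler).  Python returns a SET, whose iteration
-- order is not modelled; both ports return the set's elements sorted ascending as the one
-- canonical representation of that unordered value.

-- ===== PORT A =====
-- the module constant `connections` (each inner 2-list as a pair)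
def pvConnections : List (List (Int × Int)) :=
  [[(1, 2), (2, 3)],
   [(4, 5), (5, 6)],
   [(7, 8), (8, 9)],
   [(10, 11), (11, 12)],
   [(14, 15), (15, 16), (14, 16), (22, 14), (22, 16)],
   [(18, 19), (19, 20)]]

-- body of the innermost `for p1, p2 in feature` loop
def pvEdgeStep (st : PySem.Set Int × Bool) (e : Int × Int) : PySem.Set Int × Bool :=
  if st.1.contains e.1 || st.1.contains e.2 then
    if !(st.1.contains e.1) || !(st.1.contains e.2) then
      (PySem.Set.add (PySem.Set.add st.1 e.1) e.2, true)
    else st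
  else st

-- one execution of the while-loop body: `changed = False; for feature in connections: for p1, p2 in feature: …`
def pvSweep (connected : PySem.Set Int) : PySem.Set Int × Bool :=
  pvConnections.foldl (fun st feature => feature.foldl pvEdgeStep st) (connected, false)

-- `while changed:` — fuel-bounded recursion; every iteration entered with changed=True adds at
-- least one of the 19 graph nodes, so 21 units of fuel are never exhausted (exact on all inputs)
def pvWhile : Nat → PySem.Set Int → PySem.Set Int
  | 0, connected => connected
  | n + 1, connected =>
      if (pvSweep connected).2 then pvWhile n (pvSweep connected).1 else (pvSweep connected).1

def get_connected_points (start_points : List Int) : List Int :=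
  PySem.List.sorted (pvWhile 21 (PySem.Set.ofList start_points)) (fun x => x) false

-- ===== PORT B =====
-- the module constant `components`
def pvComponents : List (List Int) :=
  [[1, 2, 3], [4, 5, 6], [7, 8, 9], [10, 11, 12], [14, 15, 16, 22], [18, 19, 20]]

def get_connected_points_alt (start_points : List Int) : List Int :=
  let seeds := PySem.Set.ofList start_points
  let result := pvComponents.foldl
    (fun result comp =>
      if !(PySem.Set.isdisjoint (PySem.Set.ofList comp) seeds) then PySem.Set.update result comp
      else result)
    seeds
  PySem.List.sorted result (fun x => x) false

-- ===== PRECONDITION & SPEC =====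
def Spec_get_connected_points (start_points : List Int) (out : List Int) : Prop := out = get_connected_points_alt start_points
instance (start_points : List Int) (out : List Int) : Decidable (Spec_get_connected_points start_points out) := by unfold Spec_get_connected_points; infer_instance

-- ===== CLAIM (what is proved, stated in full; the proofs are below) =====
def Claim_equal_get_connected_points : Prop := ∀ (start_points : List Int), Dom_get_connected_points start_points → Spec_get_connected_points start_points (get_connected_points start_points)

-- ===== LEMMAS AND PROOFS =====

-- the flattened edge list, and pvSweep as one flat fold over it
def pvEdges : List (Int × Int) := pvConnections.flatten

theorem pvSweep_eq_foldl (c : PySem.Set Int) :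
    pvSweep c = pvEdges.foldl pvEdgeStep (c, false) := by
  rw [pvSweep, pvEdges, List.foldl_flatten]

-- `∃ y in comp with y in S` ("the component is hit by the start set")
def pvHit (S comp : List Int) : Prop := ∃ y ∈ comp, y ∈ S

-- the intended value: S plus every hit component
def pvClosure (S : List Int) (x : Int) : Prop :=
  x ∈ S ∨ ∃ comp ∈ pvComponents, pvHit S comp ∧ x ∈ comp

theorem grow_step (st : PySem.Set Int × Bool) (e : Int × Int) {x : Int} (hx : x ∈ st.1) :
    x ∈ (pvEdgeStep st e).1 := by
  unfold pvEdgeStep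
  split_ifs <;> simp_all [PySem.Set.mem_add]

theorem grow_foldl (L : List (Int × Int)) : ∀ (st : PySem.Set Int × Bool) {x : Int},
    x ∈ st.1 → x ∈ (L.foldl pvEdgeStep st).1 := by
  induction L with
  | nil => intro st x hx; simpa using hx
  | cons e L ih => intro st x hx; exact ih _ (grow_step st e hx)

theorem edge_foldl (L : List (Int × Int)) : ∀ (st : PySem.Set Int × Bool) (p q : Int),
    (p, q) ∈ L → (p ∈ st.1 ∨ q ∈ st.1) →
    p ∈ (L.foldl pvEdgeStep st).1 ∧ q ∈ (L.foldl pvEdgeStep st).1 := by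
  induction L with
  | nil => intro st p q h; simp at h
  | cons e L ih =>
    intro st p q hmem hst
    rcases List.mem_cons.mp hmem with heq | htail
    · subst heq
      have h1 : p ∈ (pvEdgeStep st (p, q)).1 ∧ q ∈ (pvEdgeStep st (p, q)).1 := by
        unfold pvEdgeStep
        split_ifs with h1 h2
        · simp [PySem.Set.mem_add]
        · -- not fired because both already present
          simp only [Bool.or_eq_true, Bool.not_eq_true', PySem.Set.contains_eq_listContains] at h1 h2
          push Not at h2
          constructor <;> simp_all
        · -- outer guard false contradicts hst
          exfalso
          simp only [Bool.or_eq_true, PySem.Set.contains_eq_listContains,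
            List.contains_iff_mem] at h1
          push Not at h1
          rcases hst with h | h
          · exact h1.1 h
          · exact h1.2 h
      exact ⟨grow_foldl L _ h1.1, grow_foldl L _ h1.2⟩
    · refine ih (pvEdgeStep st e) p q htail ?_
      rcases hst with h | h
      · exact Or.inl (grow_step st e h)
      · exact Or.inr (grow_step st e h)

theorem sound_foldl (C : Int → Prop) (L : List (Int × Int)) :
    ∀ (st : PySem.Set Int × Bool),
    (∀ p q, (p, q) ∈ L → (C p ↔ C q)) → (∀ x ∈ st.1, C x) →
    ∀ x ∈ (L.foldl pvEdgeStep st).1, C x := by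
  induction L with
  | nil => intro st _ hst x hx; exact hst x hx
  | cons e L ih =>
    intro st hC hst x hx
    refine ih (pvEdgeStep st e) (fun p q h => hC p q (List.mem_cons_of_mem _ h)) ?_ x hx
    intro y hy
    have hedge := hC e.1 e.2 (by cases e; exact List.mem_cons_self ..)
    unfold pvEdgeStep at hy
    split_ifs at hy with h1 h2
    · simp only [PySem.Set.mem_add] at hy
      rcases hy with (hy | rfl) | rfl
      · exact hst y hy
      · -- y = p1; guard: p1 ∈ st.1 ∨ p2 ∈ st.1
        simp only [Bool.or_eq_true, PySem.Set.contains_eq_listContains,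
          List.contains_iff_mem] at h1
        rcases h1 with h | h
        · exact hst _ h
        · exact hedge.mpr (hst _ h)
      · simp only [Bool.or_eq_true, PySem.Set.contains_eq_listContains,
          List.contains_iff_mem] at h1
        rcases h1 with h | h
        · exact hedge.mp (hst _ h)
        · exact hst _ h
    · exact hst y hy
    · exact hst y hy

theorem flag_mono (L : List (Int × Int)) : ∀ (c : PySem.Set Int),
    (L.foldl pvEdgeStep (c, true)).2 = true := by
  induction L with
  | nil => intro c; rfl
  | cons e L ih =>
    intro c
    have : pvEdgeStep (c, true) e = (( pvEdgeStep (c, true) e).1, true) := by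
      unfold pvEdgeStep; split_ifs <;> rfl
    rw [List.foldl_cons, this]
    exact ih _

theorem flag_false (L : List (Int × Int)) : ∀ (c : PySem.Set Int),
    (L.foldl pvEdgeStep (c, false)).2 = false → (L.foldl pvEdgeStep (c, false)).1 = c := by
  induction L with
  | nil => intro c _; rfl
  | cons e L ih =>
    intro c hflag
    rw [List.foldl_cons] at hflag ⊢
    by_cases hfire : pvEdgeStep (c, false) e = (c, false)
    · rw [hfire] at hflag ⊢; exact ih c hflag
    · exfalso
      have : pvEdgeStep (c, false) e = ((pvEdgeStep (c, false) e).1, true) := by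
        unfold pvEdgeStep at hfire ⊢
        split_ifs with h1 h2 <;> simp_all
      rw [this, flag_mono] at hflag
      exact Bool.true_eq_false.mp hflag

theorem nodup_foldl (L : List (Int × Int)) : ∀ (st : PySem.Set Int × Bool),
    st.1.Nodup → (L.foldl pvEdgeStep st).1.Nodup := by
  induction L with
  | nil => intro st h; exact h
  | cons e L ih =>
    intro st h
    refine ih _ ?_
    unfold pvEdgeStep
    split_ifs <;> simp_all [PySem.Set.nodup_add]

-- while-loop lemmas
theorem while_grow : ∀ (n : Nat) (c : PySem.Set Int) {x : Int}, x ∈ c → x ∈ pvWhile n c := by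
  intro n
  induction n with
  | zero => intro c x hx; exact hx
  | succ n ih =>
    intro c x hx
    unfold pvWhile
    rw [pvSweep_eq_foldl]
    by_cases hch : (pvEdges.foldl pvEdgeStep (c, false)).2 = true
    · rw [if_pos hch]; exact ih _ (grow_foldl _ _ hx)
    · rw [if_neg hch]; exact grow_foldl _ _ hx

theorem while_nodup : ∀ (n : Nat) (c : PySem.Set Int), c.Nodup → (pvWhile n c).Nodup := by
  intro n
  induction n with
  | zero => intro c h; exact h
  | succ n ih =>
    intro c h
    unfold pvWhile
    rw [pvSweep_eq_foldl]
    by_cases hch : (pvEdges.foldl pvEdgeStep (c, false)).2 = true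
    · rw [if_pos hch]; exact ih _ (nodup_foldl _ _ h)
    · rw [if_neg hch]; exact nodup_foldl _ _ h

theorem while_sound (C : Int → Prop) (hC : ∀ p q, (p, q) ∈ pvEdges → (C p ↔ C q)) :
    ∀ (n : Nat) (c : PySem.Set Int), (∀ x ∈ c, C x) → ∀ x ∈ pvWhile n c, C x := by
  intro n
  induction n with
  | zero => intro c h; exact h
  | succ n ih =>
    intro c h x hx
    unfold pvWhile at hx
    rw [pvSweep_eq_foldl] at hx
    by_cases hch : (pvEdges.foldl pvEdgeStep (c, false)).2 = true
    · rw [if_pos hch] at hx; exact ih _ (sound_foldl C _ _ hC h) x hx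
    · rw [if_neg hch] at hx; exact sound_foldl C _ _ hC h x hx

theorem sweep1_sub_while (n : Nat) (c : PySem.Set Int) {x : Int}
    (hx : x ∈ (pvSweep c).1) : x ∈ pvWhile (n + 1) c := by
  unfold pvWhile
  by_cases hch : (pvSweep c).2 = true
  · rw [if_pos hch]; exact while_grow n _ hx
  · rw [if_neg hch]; exact hx

theorem sweep2_sub_while (n : Nat) (c : PySem.Set Int) {x : Int}
    (hx : x ∈ (pvSweep (pvSweep c).1).1) : x ∈ pvWhile (n + 2) c := by
  unfold pvWhile
  by_cases hch : (pvSweep c).2 = true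
  · rw [if_pos hch]; exact sweep1_sub_while n _ hx
  · -- no change: (pvSweep c).1 = c
    rw [if_neg hch]
    have hc : (pvSweep c).1 = c := by
      rw [pvSweep_eq_foldl] at hch ⊢
      exact flag_false _ _ (by simpa using hch)
    rw [hc] at hx
    exact hx

-- edge / grow restated through pvSweep
theorem edge_sweep {p q : Int} (c : PySem.Set Int) (h : (p, q) ∈ pvEdges)
    (hm : p ∈ c ∨ q ∈ c) : p ∈ (pvSweep c).1 ∧ q ∈ (pvSweep c).1 := by
  rw [pvSweep_eq_foldl]
  exact edge_foldl _ _ _ _ h hm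

theorem grow_sweep (c : PySem.Set Int) {x : Int} (hx : x ∈ c) : x ∈ (pvSweep c).1 := by
  rw [pvSweep_eq_foldl]
  exact grow_foldl _ _ hx

-- a three-node path component a–b–d is fully present after two sweeps once hit
theorem path_done {a b d : Int} (c : PySem.Set Int)
    (hab : (a, b) ∈ pvEdges) (hbd : (b, d) ∈ pvEdges)
    (h : a ∈ c ∨ b ∈ c ∨ d ∈ c) :
    a ∈ (pvSweep (pvSweep c).1).1 ∧ b ∈ (pvSweep (pvSweep c).1).1 ∧
    d ∈ (pvSweep (pvSweep c).1).1 := by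
  rcases h with h | h | h
  · obtain ⟨ha1, hb1⟩ := edge_sweep c hab (Or.inl h)
    obtain ⟨hb2, hd2⟩ := edge_sweep (pvSweep c).1 hbd (Or.inl hb1)
    exact ⟨grow_sweep _ ha1, hb2, hd2⟩
  · obtain ⟨ha1, hb1⟩ := edge_sweep c hab (Or.inr h)
    obtain ⟨hb1', hd1⟩ := edge_sweep c hbd (Or.inl h)
    exact ⟨grow_sweep _ ha1, grow_sweep _ hb1, grow_sweep _ hd1⟩
  · obtain ⟨hb1, hd1⟩ := edge_sweep c hbd (Or.inr h)
    obtain ⟨ha2, hb2⟩ := edge_sweep (pvSweep c).1 hab (Or.inr hb1)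
    exact ⟨ha2, hb2, grow_sweep _ hd1⟩

-- the K4-minus-one component {14,15,16,22} is fully present after two sweeps once hit
theorem comp5_done (c : PySem.Set Int)
    (h : (14 : Int) ∈ c ∨ (15 : Int) ∈ c ∨ (16 : Int) ∈ c ∨ (22 : Int) ∈ c) :
    (14 : Int) ∈ (pvSweep (pvSweep c).1).1 ∧ (15 : Int) ∈ (pvSweep (pvSweep c).1).1 ∧
    (16 : Int) ∈ (pvSweep (pvSweep c).1).1 ∧ (22 : Int) ∈ (pvSweep (pvSweep c).1).1 := by
  have e1 : ((14 : Int), (15 : Int)) ∈ pvEdges := by decide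
  have e2 : ((15 : Int), (16 : Int)) ∈ pvEdges := by decide
  have e3 : ((14 : Int), (16 : Int)) ∈ pvEdges := by decide
  have e4 : ((22 : Int), (14 : Int)) ∈ pvEdges := by decide
  have e5 : ((22 : Int), (16 : Int)) ∈ pvEdges := by decide
  rcases h with h | h | h | h
  · obtain ⟨h14, h15⟩ := edge_sweep c e1 (Or.inl h)
    obtain ⟨_, h16⟩ := edge_sweep c e3 (Or.inl h)
    obtain ⟨h22, _⟩ := edge_sweep c e4 (Or.inr h)
    exact ⟨grow_sweep _ h14, grow_sweep _ h15, grow_sweep _ h16, grow_sweep _ h22⟩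
  · obtain ⟨h14, h15⟩ := edge_sweep c e1 (Or.inr h)
    obtain ⟨_, h16⟩ := edge_sweep c e2 (Or.inl h)
    obtain ⟨h22, h14'⟩ := edge_sweep (pvSweep c).1 e4 (Or.inr h14)
    exact ⟨h14', grow_sweep _ h15, grow_sweep _ h16, h22⟩
  · obtain ⟨h15, h16⟩ := edge_sweep c e2 (Or.inr h)
    obtain ⟨h14, _⟩ := edge_sweep c e3 (Or.inr h)
    obtain ⟨h22, _⟩ := edge_sweep c e5 (Or.inr h)
    exact ⟨grow_sweep _ h14, grow_sweep _ h15, grow_sweep _ h16, grow_sweep _ h22⟩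
  · obtain ⟨h22, h14⟩ := edge_sweep c e4 (Or.inl h)
    obtain ⟨_, h16⟩ := edge_sweep c e5 (Or.inl h)
    obtain ⟨h14', h15⟩ := edge_sweep (pvSweep c).1 e1 (Or.inl h14)
    exact ⟨h14', h15, grow_sweep _ h16, grow_sweep _ h22⟩

-- pvClosure is invariant along every edge
theorem closure_edges (S : List Int) :
    ∀ p q : Int, (p, q) ∈ pvEdges → (pvClosure S p ↔ pvClosure S q) := by
  intro p q h
  have h' : (p = 1 ∧ q = 2) ∨ (p = 2 ∧ q = 3) ∨ (p = 4 ∧ q = 5) ∨ (p = 5 ∧ q = 6) ∨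
      (p = 7 ∧ q = 8) ∨ (p = 8 ∧ q = 9) ∨ (p = 10 ∧ q = 11) ∨ (p = 11 ∧ q = 12) ∨
      (p = 14 ∧ q = 15) ∨ (p = 15 ∧ q = 16) ∨ (p = 14 ∧ q = 16) ∨ (p = 22 ∧ q = 14) ∨
      (p = 22 ∧ q = 16) ∨ (p = 18 ∧ q = 19) ∨ (p = 19 ∧ q = 20) := by
    simpa [pvEdges, pvConnections, Prod.ext_iff] using h
  rcases h' with ⟨rfl, rfl⟩ | ⟨rfl, rfl⟩ | ⟨rfl, rfl⟩ | ⟨rfl, rfl⟩ | ⟨rfl, rfl⟩ | ⟨rfl, rfl⟩ |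
    ⟨rfl, rfl⟩ | ⟨rfl, rfl⟩ | ⟨rfl, rfl⟩ | ⟨rfl, rfl⟩ | ⟨rfl, rfl⟩ | ⟨rfl, rfl⟩ | ⟨rfl, rfl⟩ |
    ⟨rfl, rfl⟩ | ⟨rfl, rfl⟩ <;>
    (simp [pvClosure, pvComponents, pvHit]; tauto)

-- completeness: everything in the closure is present after two sweeps
theorem closure_sub_sweep2 (S : PySem.Set Int) {x : Int} (hx : pvClosure S x) :
    x ∈ (pvSweep (pvSweep S).1).1 := by
  rcases hx with hx | ⟨comp, hcomp, hhit, hxc⟩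
  · exact grow_sweep _ (grow_sweep _ hx)
  · have hcomp' : comp = [1, 2, 3] ∨ comp = [4, 5, 6] ∨ comp = [7, 8, 9] ∨
        comp = [10, 11, 12] ∨ comp = [14, 15, 16, 22] ∨ comp = [18, 19, 20] := by
      simpa [pvComponents] using hcomp
    rcases hcomp' with rfl | rfl | rfl | rfl | rfl | rfl
    · obtain ⟨h1, h2, h3⟩ := path_done S (a := 1) (b := 2) (d := 3) (by decide) (by decide)
        (by simpa [pvHit] using hhit)
      simp only [List.mem_cons, List.not_mem_nil, or_false] at hxc
      rcases hxc with rfl | rfl | rfl <;> assumption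
    · obtain ⟨h1, h2, h3⟩ := path_done S (a := 4) (b := 5) (d := 6) (by decide) (by decide)
        (by simpa [pvHit] using hhit)
      simp only [List.mem_cons, List.not_mem_nil, or_false] at hxc
      rcases hxc with rfl | rfl | rfl <;> assumption
    · obtain ⟨h1, h2, h3⟩ := path_done S (a := 7) (b := 8) (d := 9) (by decide) (by decide)
        (by simpa [pvHit] using hhit)
      simp only [List.mem_cons, List.not_mem_nil, or_false] at hxc
      rcases hxc with rfl | rfl | rfl <;> assumption
    · obtain ⟨h1, h2, h3⟩ := path_done S (a := 10) (b := 11) (d := 12) (by decide) (by decide)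
        (by simpa [pvHit] using hhit)
      simp only [List.mem_cons, List.not_mem_nil, or_false] at hxc
      rcases hxc with rfl | rfl | rfl <;> assumption
    · obtain ⟨h1, h2, h3, h4⟩ := comp5_done S (by simpa [pvHit] using hhit)
      simp only [List.mem_cons, List.not_mem_nil, or_false] at hxc
      rcases hxc with rfl | rfl | rfl | rfl <;> assumption
    · obtain ⟨h1, h2, h3⟩ := path_done S (a := 18) (b := 19) (d := 20) (by decide) (by decide)
        (by simpa [pvHit] using hhit)
      simp only [List.mem_cons, List.not_mem_nil, or_false] at hxc
      rcases hxc with rfl | rfl | rfl <;> assumption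

-- characterisation of A's loop
theorem memA (S : PySem.Set Int) (x : Int) : x ∈ pvWhile 21 S ↔ pvClosure S x := by
  constructor
  · intro hx
    exact while_sound (pvClosure S) (closure_edges S) 21 S (fun y hy => Or.inl hy) x hx
  · intro hx
    exact sweep2_sub_while 19 S (closure_sub_sweep2 S hx)

-- characterisation of B's fold
theorem memB (seeds : PySem.Set Int) :
    ∀ (comps : List (List Int)) (r : PySem.Set Int) (x : Int),
    x ∈ comps.foldl
      (fun result comp =>
        if !(PySem.Set.isdisjoint (PySem.Set.ofList comp) seeds) then PySem.Set.update result comp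
        else result) r ↔
    x ∈ r ∨ ∃ comp ∈ comps, pvHit seeds comp ∧ x ∈ comp := by
  intro comps
  induction comps with
  | nil => intro r x; simp
  | cons comp comps ih =>
    intro r x
    rw [List.foldl_cons, ih]
    have hcond : (!(PySem.Set.isdisjoint (PySem.Set.ofList comp) seeds)) = true ↔
        pvHit seeds comp := by
      simp only [Bool.not_eq_true', pvHit]
      rw [← Bool.not_eq_true, PySem.Set.isdisjoint_iff]
      push Not
      constructor
      · rintro ⟨y, hy, hy2⟩
        exact ⟨y, (PySem.Set.mem_ofList _ _).mp hy, hy2⟩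
      · rintro ⟨y, hy, hy2⟩
        exact ⟨y, (PySem.Set.mem_ofList _ _).mpr hy, hy2⟩
    by_cases hc : pvHit seeds comp
    · rw [if_pos (hcond.mpr hc), PySem.Set.mem_update]
      simp only [List.mem_cons]
      constructor
      · rintro ((h | h) | h)
        · exact Or.inl h
        · exact Or.inr ⟨comp, Or.inl rfl, hc, h⟩
        · rcases h with ⟨c, hmem, hh, hx⟩; exact Or.inr ⟨c, Or.inr hmem, hh, hx⟩
      · rintro (h | ⟨c, (rfl | hmem), hh, hx⟩)
        · exact Or.inl (Or.inl h)
        · exact Or.inl (Or.inr hx)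
        · exact Or.inr ⟨c, hmem, hh, hx⟩
    · rw [if_neg (by simpa [hcond] using hc)]
      simp only [List.mem_cons]
      constructor
      · rintro (h | ⟨c, hmem, hh, hx⟩)
        · exact Or.inl h
        · exact Or.inr ⟨c, Or.inr hmem, hh, hx⟩
      · rintro (h | ⟨c, (rfl | hmem), hh, hx⟩)
        · exact Or.inl h
        · exact absurd hh hc
        · exact Or.inr ⟨c, hmem, hh, hx⟩

theorem nodupB (seeds : PySem.Set Int) :
    ∀ (comps : List (List Int)) (r : PySem.Set Int), r.Nodup →
    (comps.foldl
      (fun result comp =>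
        if !(PySem.Set.isdisjoint (PySem.Set.ofList comp) seeds) then PySem.Set.update result comp
        else result) r).Nodup := by
  intro comps
  induction comps with
  | nil => intro r h; exact h
  | cons comp comps ih =>
    intro r h
    rw [List.foldl_cons]
    refine ih _ ?_
    split
    · exact PySem.Set.nodup_update _ _ h
    · exact h

-- ===== VERDICT (by name: the statement is the Claim_ definition above) =====
theorem get_connected_points_spec : Claim_equal_get_connected_points := by
  intro start_points _
  unfold Spec_get_connected_points get_connected_points get_connected_points_alt
  apply PySem.List.sorted_eq_sorted_of_perm _ _ _ (fun a b h => h)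
  refine (List.perm_ext_iff_of_nodup ?_ ?_).mpr ?_
  · exact while_nodup 21 _ (PySem.Set.nodup_ofList _)
  · exact nodupB _ _ _ (PySem.Set.nodup_ofList _)
  · intro x
    rw [memA, memB]
    exact Iff.rfl
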